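-- pv_equiv track=rewrite | github.com/galid1/Algorithm | python/exams/21.05.08(kakao-intern)/2.py | check
-- ===== SOURCE A (Python) =====
-- from collections import deque
--
-- ds = [(-1, 0), (1, 0), (0, -1), (0, 1)]
--
-- def check(place):
--     applicants = find_applicant(place)
--
--     # 지원자가 없는 경우 거리두기 OK
--     if not applicants:
--         return 1
--
--     # 각 지원자 별 dfs
--     for p in applicants:
--         q = deque([(p[0], p[1], 0)])
--         visited = [[False for _ in range(len(place[0]))] for _ in range(len(place))]
--         visited[p[0]][p[1]] = True
--         while q:
--             for _ in range(len(q)):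
--                 cx, cy, distance = q.popleft()
--
--                 for dx, dy in ds:
--                     nx, ny, nd = cx+dx, cy+dy, distance+1
--
--                     if nd > 2:
--                         continue
--
--                     if 0 <= nx < len(place) and 0 <= ny < len(place[0]) and not visited[nx][ny]:
--                         # 지원자가 맨해튼 거리 2이내
--                         if place[nx][ny] == 'P':
--                             return 0
--
--                         if place[nx][ny] == 'O':
--                             q.append((nx, ny, nd))
--                             visited[nx][ny] = True
--
--     # 모든 지원자가 거리두기 지킴
--     return 1
--
-- def find_applicant(place):
--     applicants = []
--     for i in range(len(place)):
--         for j in range(len(place[0])):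
--             if place[i][j] == 'P':
--                 applicants.append((i, j))
--
--     return applicants
-- ===== SOURCE B (Python) =====
-- def bad(place, x1, y1, x2, y2):
--     d = abs(x1 - x2) + abs(y1 - y2)
--     if d == 1:
--         return True
--     if d == 2:
--         if x1 == x2:
--             return place[x1][(y1 + y2) // 2] == 'O'
--         if y1 == y2:
--             return place[(x1 + x2) // 2][y1] == 'O'
--         return place[x1][y2] == 'O' or place[x2][y1] == 'O'
--     return False
--
-- def check(place):
--     w = len(place[0]) if place else 0
--     ps = [(i, j) for i, row in enumerate(place) for j in range(w) if row[j] == 'P']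
--     while ps:
--         (x1, y1), ps = ps[0], ps[1:]
--         if any(bad(place, x1, y1, x2, y2) for (x2, y2) in ps):
--             return 0
--     return 1
-- ===== Notes on version B (the rewrite author's own statement) =====
-- stated objective: simpler
-- what changed: Replaces A's per-applicant depth-limited BFS (a deque and a fresh h x w visited matrix for every applicant) with a single pairwise scan over the collected applicant coordinates, deciding each pair directly by Manhattan distance and the explicit middle/corner blocking-cell rule.
import Mathlib
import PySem

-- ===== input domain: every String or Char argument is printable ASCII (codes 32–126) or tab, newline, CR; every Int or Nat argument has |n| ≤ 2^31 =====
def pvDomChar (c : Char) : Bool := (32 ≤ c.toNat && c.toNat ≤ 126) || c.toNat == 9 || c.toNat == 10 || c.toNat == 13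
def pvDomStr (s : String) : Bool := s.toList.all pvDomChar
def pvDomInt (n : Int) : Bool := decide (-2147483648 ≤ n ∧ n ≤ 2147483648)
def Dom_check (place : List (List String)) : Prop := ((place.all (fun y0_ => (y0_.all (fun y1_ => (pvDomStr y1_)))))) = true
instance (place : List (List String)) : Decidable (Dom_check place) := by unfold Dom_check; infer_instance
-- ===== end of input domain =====

-- B replaces A's per-applicant breadth-first search with a direct pairwise scan of the
-- applicant coordinates (Manhattan distance + the blocking-cell rule); objective: simpler.

-- ===== PORT A =====
def dsA : List (Int × Int) := [(-1, 0), (1, 0), (0, -1), (0, 1)]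

-- place[i][j]; every access in A is guarded by 0 ≤ i < len(place), 0 ≤ j < len(place[0]),
-- so toNat/getD are exact there (rows at least that long by Pre_check)
def cellA (place : List (List String)) (i j : Int) : String :=
  (place.getD i.toNat []).getD j.toNat ""

def visGet (v : List (List Bool)) (x y : Int) : Bool :=
  (v.getD x.toNat []).getD y.toNat false

def visSet (v : List (List Bool)) (x y : Int) : List (List Bool) :=
  v.set x.toNat ((v.getD x.toNat []).set y.toNat true)

def findApplicant (place : List (List String)) : List (Int × Int) :=
  (List.range place.length).foldl (fun acc (i : Nat) =>
    (List.range (place.headD []).length).foldl (fun acc2 (j : Nat) =>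
      if cellA place (i : Int) (j : Int) = "P" then acc2 ++ [((i : Int), (j : Int))] else acc2) acc) []

-- the `for dx, dy in ds` body (with Python's `return 0` modelled as `none`)
def runDs (place : List (List String)) (cx cy distance : Int) :
    List (Int × Int) → List (Int × Int × Int) → List (List Bool) →
    Option (List (Int × Int × Int) × List (List Bool))
  | [], q, v => some (q, v)
  | (dx, dy) :: rest, q, v =>
    let nx := cx + dx
    let ny := cy + dy
    let nd := distance + 1
    if nd > 2 then runDs place cx cy distance rest q v
    else if (0 ≤ nx ∧ nx < (place.length : Int) ∧ 0 ≤ ny ∧ ny < ((place.headD []).length : Int))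
        ∧ visGet v nx ny = false then
      if cellA place nx ny = "P" then none
      else if cellA place nx ny = "O" then
        runDs place cx cy distance rest (q ++ [(nx, ny, nd)]) (visSet v nx ny)
      else runDs place cx cy distance rest q v
    else runDs place cx cy distance rest q v

-- the `for _ in range(len(q))` loop (k pops)
def runInner (place : List (List String)) :
    Nat → List (Int × Int × Int) → List (List Bool) →
    Option (List (Int × Int × Int) × List (List Bool))
  | 0, q, v => some (q, v)
  | _ + 1, [], v => some ([], v)
  | k + 1, (cx, cy, d) :: qs, v =>
    match runDs place cx cy d dsA qs v with
    | none => none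
    | some (q', v') => runInner place k q' v'

-- the `while q` loop; fuel 4 (the distance-2 cutoff empties the queue within 3 iterations, see lemmas)
def runWhile (place : List (List String)) :
    Nat → List (Int × Int × Int) → List (List Bool) → Bool
  | 0, _, _ => false
  | fuel + 1, q, v =>
    if q.isEmpty then false
    else
      match runInner place q.length q v with
      | none => true
      | some (q', v') => runWhile place fuel q' v'

def bfsFrom (place : List (List String)) (p : Int × Int) : Bool :=
  let visited0 : List (List Bool) :=
    (List.range place.length).map (fun _ => (List.range (place.headD []).length).map (fun _ => false))
  runWhile place 4 [(p.1, p.2, 0)] (visSet visited0 p.1 p.2)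

def check (place : List (List String)) : Int :=
  let applicants := findApplicant place
  if applicants.isEmpty then 1
  else if applicants.any (fun p => bfsFrom place p) then 0 else 1

-- ===== PORT B =====
def cellB (place : List (List String)) (i j : Int) : String :=
  (place.getD i.toNat []).getD j.toNat ""

def badPair (place : List (List String)) (x1 y1 x2 y2 : Int) : Bool :=
  let d : Int := |x1 - x2| + |y1 - y2|
  if d = 1 then true
  else if d = 2 then
    if x1 = x2 then decide (cellB place x1 (PySem.Int.floordiv (y1 + y2) 2) = "O")
    else if y1 = y2 then decide (cellB place (PySem.Int.floordiv (x1 + x2) 2) y1 = "O")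
    else (decide (cellB place x1 y2 = "O") || decide (cellB place x2 y1 = "O"))
  else false

def appsB (place : List (List String)) : List (Int × Int) :=
  let w : Nat := if place.isEmpty then 0 else (place.headD []).length
  (PySem.List.enumerate place).flatMap (fun ir =>
    (List.range w).filterMap (fun (j : Nat) =>
      if ir.2.getD j "" = "P" then some (ir.1, (j : Int)) else none))

def pairScan (place : List (List String)) : List (Int × Int) → Int
  | [] => 1
  | (x1, y1) :: rest =>
    if rest.any (fun q => badPair place x1 y1 q.1 q.2) then 0 else pairScan place rest

def check_alt (place : List (List String)) : Int :=
  pairScan place (appsB place)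

-- ===== PRECONDITION & SPEC =====
-- Pre_check excludes ragged grids with a row shorter than row 0, on which Python A raises IndexError.
def Pre_check (place : List (List String)) : Prop :=
  ∀ r ∈ place, (place.headD []).length ≤ r.length
instance (place : List (List String)) : Decidable (Pre_check place) := by unfold Pre_check; infer_instance

def pvWitness_check : List (List String) := [["P", "O", "X"], ["O", "X", "P"]]

def Spec_check (place : List (List String)) (out : Int) : Prop := out = check_alt place
instance (place : List (List String)) (out : Int) : Decidable (Spec_check place out) := by unfold Spec_check; infer_instance

-- ===== CLAIM (what is proved, stated in full; the proofs are below) =====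
def Claim_equal_check : Prop := ∀ (place : List (List String)), Dom_check place → Pre_check place → Spec_check place (check place)

-- ===== LEMMAS AND PROOFS =====

-- proof-side abbreviations
def inbB (place : List (List String)) (x y : Int) : Bool :=
  decide (0 ≤ x) && decide (x < (place.length : Int)) && decide (0 ≤ y) && decide (y < ((place.headD []).length : Int))

def WFv (place : List (List String)) (v : List (List Bool)) : Prop :=
  v.length = place.length ∧ ∀ i (h : i < v.length), v[i].length = (place.headD []).length

-- visited invariant for the BFS started at p
def Jinv (place : List (List String)) (p : Int × Int) (v : List (List Bool)) : Prop :=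
  WFv place v ∧ visGet v p.1 p.2 = true ∧
  ∀ x y : Int, 0 ≤ x → 0 ≤ y → visGet v x y = true → ((x, y) = p ∨ cellA place x y = "O")

-- "a P-cell other than p is adjacent to (x, y)"
def ConfAt (place : List (List String)) (p : Int × Int) (x y : Int) : Prop :=
  ∃ dd ∈ dsA, inbB place (x + dd.1) (y + dd.2) = true ∧
    cellA place (x + dd.1) (y + dd.2) = "P" ∧ (x + dd.1, y + dd.2) ≠ p

-- characterization of A's per-applicant BFS
def ConfP (place : List (List String)) (p : Int × Int) : Prop :=
  ConfAt place p p.1 p.2 ∨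
  ∃ dd ∈ dsA, inbB place (p.1 + dd.1) (p.2 + dd.2) = true ∧
    cellA place (p.1 + dd.1) (p.2 + dd.2) = "O" ∧ ConfAt place p (p.1 + dd.1) (p.2 + dd.2)

def hitP (place : List (List String)) (v : List (List Bool)) (cx cy : Int) (dd : Int × Int) : Prop :=
  inbB place (cx + dd.1) (cy + dd.2) = true ∧ visGet v (cx + dd.1) (cy + dd.2) = false ∧
    cellA place (cx + dd.1) (cy + dd.2) = "P"

def newsF (place : List (List String)) (v : List (List Bool)) (cx cy d : Int)
    (dirs : List (Int × Int)) : List (Int × Int × Int) :=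
  dirs.filterMap (fun dd =>
    if inbB place (cx + dd.1) (cy + dd.2) = true ∧ visGet v (cx + dd.1) (cy + dd.2) = false ∧
        cellA place (cx + dd.1) (cy + dd.2) = "O"
    then some (cx + dd.1, cy + dd.2, d + 1) else none)

def markAll (v : List (List Bool)) (l : List (Int × Int × Int)) : List (List Bool) :=
  l.foldl (fun vv e => visSet vv e.1 e.2.1) v

-- ---- visited-grid lemmas ----

lemma getD_set_ne {α : Type} (l : List α) (i j : Nat) (r : α) (d : α) (h : i ≠ j) :
    (l.set i r).getD j d = l.getD j d := by
  simp [List.getD_eq_getElem?_getD, List.getElem?_set_ne h]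

lemma getD_set_self {α : Type} (l : List α) (i : Nat) (r : α) (d : α) :
    (l.set i r).getD i d = if i < l.length then r else d := by
  by_cases h : i < l.length
  · rw [if_pos h, List.getD_eq_getElem _ _ (by simpa using h), List.getElem_set_self]
  · rw [if_neg h, List.getD_eq_default _ _ (by simp only [List.length_set]; omega)]

lemma inbB_iff (place : List (List String)) (x y : Int) :
    inbB place x y = true ↔
      0 ≤ x ∧ x < (place.length : Int) ∧ 0 ≤ y ∧ y < ((place.headD []).length : Int) := by
  simp [inbB]; tauto

-- master description of visSet
lemma visGet_visSet (v : List (List Bool)) (a b x y : Int) :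
    visGet (visSet v a b) x y =
      if x.toNat = a.toNat ∧ y.toNat = b.toNat ∧ a.toNat < v.length ∧
          b.toNat < (v.getD a.toNat []).length then true
      else visGet v x y := by
  unfold visGet visSet
  by_cases hx : x.toNat = a.toNat
  · rw [hx, getD_set_self]
    by_cases hl : a.toNat < v.length
    · rw [if_pos hl]
      by_cases hy : y.toNat = b.toNat
      · rw [hy, getD_set_self]
        by_cases hb : b.toNat < (v.getD a.toNat []).length
        · rw [if_pos hb, if_pos ⟨rfl, rfl, hl, hb⟩]
        · rw [if_neg hb, if_neg (by tauto), List.getD_eq_default _ _ (by omega)]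
      · rw [getD_set_ne _ _ _ _ _ (fun hc => hy hc.symm), if_neg (by tauto)]
    · rw [if_neg hl, if_neg (by tauto), List.getD_eq_default v _ (by omega)]
  · rw [getD_set_ne _ _ _ _ _ (fun hc => hx hc.symm), if_neg (by tauto)]

lemma visSet_WF (place : List (List String)) (v : List (List Bool)) (x y : Int)
    (h : WFv place v) : WFv place (visSet v x y) := by
  obtain ⟨h1, h2⟩ := h
  refine ⟨by simpa [visSet] using h1, ?_⟩
  intro i hi
  simp only [visSet, List.length_set] at hi
  simp only [visSet]
  rw [List.getElem_set]
  split
  · next heq =>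
    rw [List.length_set]
    rw [List.getD_eq_getElem _ _ (heq ▸ hi)]
    exact h2 _ (heq ▸ hi)
  · exact h2 i hi

lemma visGet_visSet_self (place : List (List String)) (v : List (List Bool)) (x y : Int)
    (h : WFv place v) (hx : inbB place x y = true) : visGet (visSet v x y) x y = true := by
  obtain ⟨h1, h2⟩ := h
  rw [inbB_iff] at hx
  have hxl : x.toNat < v.length := by omega
  have hyl : y.toNat < (v.getD x.toNat []).length := by
    rw [List.getD_eq_getElem _ _ hxl, h2 _ hxl]; omega
  rw [visGet_visSet, if_pos ⟨rfl, rfl, hxl, hyl⟩]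

lemma visGet_visSet_mono (v : List (List Bool)) (a b x y : Int)
    (h : visGet v x y = true) : visGet (visSet v a b) x y = true := by
  rw [visGet_visSet]
  split
  · rfl
  · exact h

lemma visGet_visSet_bound (v : List (List Bool)) (a b x y : Int)
    (h : visGet (visSet v a b) x y = true) :
    visGet v x y = true ∨ (x.toNat = a.toNat ∧ y.toNat = b.toNat) := by
  rw [visGet_visSet] at h
  by_cases hc : x.toNat = a.toNat ∧ y.toNat = b.toNat
  · exact Or.inr hc
  · left
    rcases h' : visGet v x y with _ | _
    · exfalso
      rw [if_neg (by tauto), h'] at h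
      exact Bool.false_ne_true h
    · rfl

lemma visGet_visSet_ne (v : List (List Bool)) (a b x y : Int)
    (ha : 0 ≤ a) (hb : 0 ≤ b) (hx : 0 ≤ x) (hy : 0 ≤ y) (hne : (x, y) ≠ (a, b)) :
    visGet (visSet v a b) x y = visGet v x y := by
  rw [visGet_visSet]
  rw [if_neg]
  rintro ⟨h1, h2, -⟩
  exact hne (by ext <;> simp <;> omega)

def mkVis (place : List (List String)) : List (List Bool) :=
  (List.range place.length).map (fun _ => (List.range (place.headD []).length).map (fun _ => false))

lemma mkVis_WF (place : List (List String)) : WFv place (mkVis place) := by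
  constructor
  · simp [mkVis]
  · intro i hi
    simp only [mkVis, List.length_map, List.length_range] at hi ⊢
    simp [hi]

lemma getD_false (l : List Bool) (h : ∀ z ∈ l, z = false) (n : Nat) : l.getD n false = false := by
  by_cases hn : n < l.length
  · rw [List.getD_eq_getElem _ _ hn]
    exact h _ (l.getElem_mem hn)
  · rw [List.getD_eq_default _ _ (by omega)]

lemma visGet_mkVis (place : List (List String)) (x y : Int) : visGet (mkVis place) x y = false := by
  unfold visGet
  by_cases hx : x.toNat < (mkVis place).length
  · rw [List.getD_eq_getElem _ _ hx]
    apply getD_false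
    intro z hz
    have hm : (mkVis place)[x.toNat] ∈ mkVis place := (mkVis place).getElem_mem hx
    generalize hA : (mkVis place)[x.toNat] = row at hm hz
    unfold mkVis at hm
    rw [List.mem_map] at hm
    obtain ⟨i, _, hrow⟩ := hm
    rw [← hrow] at hz
    rw [List.mem_map] at hz
    obtain ⟨j, _, hj⟩ := hz
    exact hj.symm
  · rw [List.getD_eq_default (mkVis place) _ (by omega)]
    rfl

-- ---- markAll lemmas ----

lemma markAll_WF (place : List (List String)) (l : List (Int × Int × Int)) (v : List (List Bool))
    (h : WFv place v) : WFv place (markAll v l) := by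
  induction l generalizing v with
  | nil => exact h
  | cons e l ih => exact ih _ (visSet_WF _ _ _ _ h)

lemma markAll_mono (l : List (Int × Int × Int)) (v : List (List Bool)) (x y : Int)
    (h : visGet v x y = true) : visGet (markAll v l) x y = true := by
  induction l generalizing v with
  | nil => exact h
  | cons e l ih => exact ih _ (visGet_visSet_mono _ _ _ _ _ h)

lemma markAll_bound (l : List (Int × Int × Int)) (v : List (List Bool)) (x y : Int)
    (h : visGet (markAll v l) x y = true) :
    visGet v x y = true ∨ ∃ e ∈ l, e.1.toNat = x.toNat ∧ e.2.1.toNat = y.toNat := by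
  induction l generalizing v with
  | nil => exact Or.inl h
  | cons e l ih =>
    rcases ih _ h with h' | h'
    · rcases visGet_visSet_bound _ _ _ _ _ h' with h'' | h''
      · exact Or.inl h''
      · exact Or.inr ⟨e, List.mem_cons_self, h''.1.symm, h''.2.symm⟩
    · obtain ⟨e', he', hc⟩ := h'
      exact Or.inr ⟨e', List.mem_cons_of_mem _ he', hc⟩

-- ---- newsF lemmas ----

lemma mem_newsF (place : List (List String)) (v : List (List Bool)) (cx cy d : Int)
    (dirs : List (Int × Int)) (e : Int × Int × Int) :
    e ∈ newsF place v cx cy d dirs ↔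
      ∃ dd ∈ dirs, inbB place (cx + dd.1) (cy + dd.2) = true ∧
        visGet v (cx + dd.1) (cy + dd.2) = false ∧ cellA place (cx + dd.1) (cy + dd.2) = "O" ∧
        e = (cx + dd.1, cy + dd.2, d + 1) := by
  unfold newsF
  simp only [List.mem_filterMap, Option.ite_none_right_eq_some, Option.some.injEq]
  constructor
  · rintro ⟨dd, hdd, ⟨h1, h2, h3⟩, h4⟩
    exact ⟨dd, hdd, h1, h2, h3, h4.symm⟩
  · rintro ⟨dd, hdd, h1, h2, h3, h4⟩
    exact ⟨dd, hdd, ⟨h1, h2, h3⟩, h4.symm⟩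

lemma newsF_congr (place : List (List String)) (v v' : List (List Bool)) (cx cy d : Int)
    (dirs : List (Int × Int))
    (h : ∀ dd ∈ dirs, inbB place (cx + dd.1) (cy + dd.2) = true →
      visGet v' (cx + dd.1) (cy + dd.2) = visGet v (cx + dd.1) (cy + dd.2)) :
    newsF place v' cx cy d dirs = newsF place v cx cy d dirs := by
  unfold newsF
  apply List.filterMap_congr
  intro dd hdd
  by_cases hi : inbB place (cx + dd.1) (cy + dd.2) = true
  · rw [h dd hdd hi]
  · rw [if_neg (by tauto), if_neg (by tauto)]

lemma hit_congr (place : List (List String)) (v v' : List (List Bool)) (cx cy : Int)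
    (dirs : List (Int × Int))
    (h : ∀ dd ∈ dirs, inbB place (cx + dd.1) (cy + dd.2) = true →
      visGet v' (cx + dd.1) (cy + dd.2) = visGet v (cx + dd.1) (cy + dd.2)) :
    (∃ dd ∈ dirs, hitP place v' cx cy dd) ↔ (∃ dd ∈ dirs, hitP place v cx cy dd) := by
  constructor
  · rintro ⟨dd, hdd, h1, h2, h3⟩
    exact ⟨dd, hdd, h1, by rw [← h dd hdd h1]; exact h2, h3⟩
  · rintro ⟨dd, hdd, h1, h2, h3⟩
    exact ⟨dd, hdd, h1, by rw [h dd hdd h1]; exact h2, h3⟩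

-- ---- runDs characterization ----

lemma runDs_spec (place : List (List String)) (cx cy d : Int) :
    ∀ (dirs : List (Int × Int)) (q : List (Int × Int × Int)) (v : List (List Bool)),
    ¬ d + 1 > 2 → dirs.Nodup →
    ((runDs place cx cy d dirs q v = none ↔ ∃ dd ∈ dirs, hitP place v cx cy dd) ∧
     (¬ (∃ dd ∈ dirs, hitP place v cx cy dd) →
       runDs place cx cy d dirs q v =
         some (q ++ newsF place v cx cy d dirs, markAll v (newsF place v cx cy d dirs)))) := by
  intro dirs
  induction dirs with
  | nil =>
    intro q v _ _
    constructor
    · simp [runDs]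
    · intro _
      simp [runDs, newsF, markAll]
  | cons dd rest ih =>
    intro q v hd hnd
    obtain ⟨dx, dy⟩ := dd
    rw [List.nodup_cons] at hnd
    have hstep : ∀ (dd' : Int × Int), dd' ∈ rest →
        (cx + dx, cy + dy) ≠ (cx + dd'.1, cy + dd'.2) := by
      rintro ⟨dx', dy'⟩ hmem hc
      apply hnd.1
      have h1 : dx = dx' := by
        have := congrArg Prod.fst hc
        simp at this; omega
      have h2 : dy = dy' := by
        have := congrArg Prod.snd hc
        simp at this; omega
      rw [h1, h2]; exact hmem
    simp only [runDs]
    rw [if_neg hd]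
    by_cases hc : (0 ≤ cx + dx ∧ cx + dx < (place.length : Int) ∧ 0 ≤ cy + dy ∧
        cy + dy < ((place.headD []).length : Int)) ∧ visGet v (cx + dx) (cy + dy) = false
    · rw [if_pos hc]
      have hib : inbB place (cx + dx) (cy + dy) = true := (inbB_iff _ _ _).mpr hc.1
      by_cases hP : cellA place (cx + dx) (cy + dy) = "P"
      · rw [if_pos hP]
        constructor
        · simp only [true_iff]
          exact ⟨(dx, dy), List.mem_cons_self, hib, hc.2, hP⟩
        · intro hno
          exact absurd ⟨(dx, dy), List.mem_cons_self, hib, hc.2, hP⟩ hno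
      · rw [if_neg hP]
        have hheadhit : ¬ hitP place v cx cy (dx, dy) := by
          rintro ⟨-, -, h3⟩
          exact hP h3
        by_cases hO : cellA place (cx + dx) (cy + dy) = "O"
        · rw [if_pos hO]
          have hcongr : ∀ dd' ∈ rest, inbB place (cx + dd'.1) (cy + dd'.2) = true →
              visGet (visSet v (cx + dx) (cy + dy)) (cx + dd'.1) (cy + dd'.2) =
                visGet v (cx + dd'.1) (cy + dd'.2) := by
            intro dd' hmem hib'
            rw [inbB_iff] at hib'
            exact visGet_visSet_ne _ _ _ _ _ (by omega) (by omega) (by omega) (by omega)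
              (fun hc' => hstep dd' hmem hc'.symm)
          obtain ⟨ihn, ihs⟩ := ih (q ++ [(cx + dx, cy + dy, d + 1)])
            (visSet v (cx + dx) (cy + dy)) hd hnd.2
          have hnews : newsF place v cx cy d ((dx, dy) :: rest) =
              (cx + dx, cy + dy, d + 1) :: newsF place v cx cy d rest := by
            unfold newsF
            rw [List.filterMap_cons]
            rw [if_pos ⟨hib, hc.2, hO⟩]
          constructor
          · rw [ihn, hit_congr place v _ cx cy rest hcongr]
            constructor
            · rintro ⟨dd', hm, hh⟩
              exact ⟨dd', List.mem_cons_of_mem _ hm, hh⟩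
            · rintro ⟨dd', hm, hh⟩
              rcases List.mem_cons.mp hm with h | h
              · exact absurd (h ▸ hh) hheadhit
              · exact ⟨dd', h, hh⟩
          · intro hno
            have hno' : ¬ ∃ dd' ∈ rest, hitP place (visSet v (cx + dx) (cy + dy)) cx cy dd' := by
              rw [hit_congr place v _ cx cy rest hcongr]
              rintro ⟨dd', hm, hh⟩
              exact hno ⟨dd', List.mem_cons_of_mem _ hm, hh⟩
            rw [ihs hno', hnews]
            rw [newsF_congr place v _ cx cy d rest hcongr]
            simp [markAll]
        · rw [if_neg hO]
          obtain ⟨ihn, ihs⟩ := ih q v hd hnd.2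
          have hnews : newsF place v cx cy d ((dx, dy) :: rest) = newsF place v cx cy d rest := by
            unfold newsF
            rw [List.filterMap_cons]
            rw [if_neg (by rintro ⟨-, -, h3⟩; exact hO h3)]
          constructor
          · rw [ihn]
            constructor
            · rintro ⟨dd', hm, hh⟩
              exact ⟨dd', List.mem_cons_of_mem _ hm, hh⟩
            · rintro ⟨dd', hm, hh⟩
              rcases List.mem_cons.mp hm with h | h
              · exact absurd (h ▸ hh) hheadhit
              · exact ⟨dd', h, hh⟩
          · intro hno
            rw [ihs (fun ⟨dd', hm, hh⟩ => hno ⟨dd', List.mem_cons_of_mem _ hm, hh⟩), hnews]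
    · rw [if_neg hc]
      have hheadhit : ¬ hitP place v cx cy (dx, dy) := by
        rintro ⟨h1, h2, -⟩
        rw [inbB_iff] at h1
        exact hc ⟨h1, h2⟩
      obtain ⟨ihn, ihs⟩ := ih q v hd hnd.2
      have hnews : newsF place v cx cy d ((dx, dy) :: rest) = newsF place v cx cy d rest := by
        unfold newsF
        rw [List.filterMap_cons]
        rw [if_neg (by rintro ⟨h1, h2, -⟩; rw [inbB_iff] at h1; exact hc ⟨h1, h2⟩)]
      constructor
      · rw [ihn]
        constructor
        · rintro ⟨dd', hm, hh⟩
          exact ⟨dd', List.mem_cons_of_mem _ hm, hh⟩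
        · rintro ⟨dd', hm, hh⟩
          rcases List.mem_cons.mp hm with h | h
          · exact absurd (h ▸ hh) hheadhit
          · exact ⟨dd', h, hh⟩
      · intro hno
        rw [ihs (fun ⟨dd', hm, hh⟩ => hno ⟨dd', List.mem_cons_of_mem _ hm, hh⟩), hnews]

lemma runDs_skip (place : List (List String)) (cx cy d : Int)
    (dirs : List (Int × Int)) (q : List (Int × Int × Int)) (v : List (List Bool))
    (h : d + 1 > 2) : runDs place cx cy d dirs q v = some (q, v) := by
  induction dirs with
  | nil => rfl
  | cons dd rest ih =>
    obtain ⟨dx, dy⟩ := dd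
    simp only [runDs]
    rw [if_pos h]
    exact ih

-- ---- hit ↔ ConfAt ----

lemma hit_iff_confAt (place : List (List String)) (p : Int × Int) (v : List (List Bool))
    (hJ : Jinv place p v) (cx cy : Int) :
    (∃ dd ∈ dsA, hitP place v cx cy dd) ↔ ConfAt place p cx cy := by
  obtain ⟨hWF, hpvis, hINV⟩ := hJ
  constructor
  · rintro ⟨dd, hm, h1, h2, h3⟩
    refine ⟨dd, hm, h1, h3, ?_⟩
    intro hc
    have e1 : cx + dd.1 = p.1 := congrArg Prod.fst hc
    have e2 : cy + dd.2 = p.2 := congrArg Prod.snd hc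
    rw [e1, e2] at h2
    rw [h2] at hpvis
    exact Bool.false_ne_true hpvis
  · rintro ⟨dd, hm, h1, h2, h3⟩
    refine ⟨dd, hm, h1, ?_, h2⟩
    rcases hvis : visGet v (cx + dd.1) (cy + dd.2) with _ | _
    · rfl
    · exfalso
      rw [inbB_iff] at h1
      rcases hINV _ _ (by omega) (by omega) hvis with h | h
      · exact h3 h
      · rw [h2] at h
        simp at h

-- J is preserved by marking the new O-cells
lemma Jinv_markAll (place : List (List String)) (p : Int × Int) (v : List (List Bool))
    (hJ : Jinv place p v) (cx cy d : Int) :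
    Jinv place p (markAll v (newsF place v cx cy d dsA)) := by
  obtain ⟨hWF, hpvis, hINV⟩ := hJ
  refine ⟨markAll_WF _ _ _ hWF, markAll_mono _ _ _ _ hpvis, ?_⟩
  intro x y hx hy hvis
  rcases markAll_bound _ _ _ _ hvis with h | h
  · exact hINV _ _ hx hy h
  · obtain ⟨e, he, h1, h2⟩ := h
    rw [mem_newsF] at he
    obtain ⟨dd, hm, hib, -, hO, he⟩ := he
    rw [inbB_iff] at hib
    have hx' : x = cx + dd.1 := by rw [he] at h1; simp at h1; omega
    have hy' : y = cy + dd.2 := by rw [he] at h2; simp at h2; omega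
    right
    rw [hx', hy']
    exact hO

-- ---- runInner on a level of distance-1 nodes ----

lemma runInner_gen (place : List (List String)) (p : Int × Int) :
    ∀ (l tail : List (Int × Int × Int)) (v : List (List Bool)),
    Jinv place p v → (∀ e ∈ l, e.2.2 = 1) → (∀ e ∈ tail, e.2.2 = 2) →
    ((runInner place l.length (l ++ tail) v = none ↔ ∃ e ∈ l, ConfAt place p e.1 e.2.1) ∧
     (∀ q' v', runInner place l.length (l ++ tail) v = some (q', v') →
        (∀ e ∈ q', e.2.2 = 2) ∧ Jinv place p v')) := by
  intro l
  induction l with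
  | nil =>
    intro tail v hJ _ htail
    constructor
    · simp [runInner]
    · intro q' v' h
      simp only [List.length_nil, List.nil_append, runInner] at h
      cases h
      exact ⟨htail, hJ⟩
  | cons e l ih =>
    intro tail v hJ hl htail
    obtain ⟨cx, cy, d⟩ := e
    have hd1 : d = 1 := hl _ List.mem_cons_self
    subst hd1
    simp only [List.length_cons, List.cons_append, runInner]
    have hspec := runDs_spec place cx cy 1 dsA (l ++ tail) v (by norm_num) (by decide)
    by_cases hhit : ∃ dd ∈ dsA, hitP place v cx cy dd
    · rw [hspec.1.mpr hhit]
      constructor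
      · simp only [true_iff]
        exact ⟨(cx, cy, 1), List.mem_cons_self, (hit_iff_confAt place p v hJ cx cy).mp hhit⟩
      · intro q' v' h
        cases h
    · have hne := hspec.1.not.mpr hhit
      rw [hspec.2 hhit]
      have hJ' := Jinv_markAll place p v hJ cx cy 1
      have hnews2 : ∀ e' ∈ newsF place v cx cy 1 dsA, e'.2.2 = 2 := by
        intro e' he'
        rw [mem_newsF] at he'
        obtain ⟨dd, -, -, -, -, he'⟩ := he'
        rw [he']
        norm_num
      have := ih (tail ++ newsF place v cx cy 1 dsA) (markAll v (newsF place v cx cy 1 dsA))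
        hJ' (fun e' he' => hl e' (List.mem_cons_of_mem _ he'))
        (by
          intro e' he'
          rcases List.mem_append.mp he' with h | h
          · exact htail e' h
          · exact hnews2 e' h)
      rw [← List.append_assoc] at this
      constructor
      · rw [this.1]
        constructor
        · rintro ⟨e', hm, hc⟩
          exact ⟨e', List.mem_cons_of_mem _ hm, hc⟩
        · rintro ⟨e', hm, hc⟩
          rcases List.mem_cons.mp hm with h | h
          · exfalso
            apply hhit
            rw [hit_iff_confAt place p v hJ cx cy]
            rw [h] at hc
            exact hc
          · exact ⟨e', h, hc⟩
      · exact this.2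

lemma runInner_d2 (place : List (List String)) :
    ∀ (k : Nat) (q : List (Int × Int × Int)) (v : List (List Bool)),
    (∀ e ∈ q, e.2.2 = 2) → runInner place k q v = some (q.drop k, v) := by
  intro k
  induction k with
  | zero =>
    intro q v _
    simp [runInner]
  | succ k ih =>
    intro q v hq
    cases q with
    | nil => simp [runInner]
    | cons e qs =>
      obtain ⟨cx, cy, d⟩ := e
      have hd : d = 2 := hq _ List.mem_cons_self
      subst hd
      simp only [runInner]
      rw [runDs_skip place cx cy 2 dsA qs v (by norm_num)]
      simp only [List.drop_succ_cons]
      exact ih qs v (fun e' he' => hq e' (List.mem_cons_of_mem _ he'))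

-- ---- the BFS characterization ----

lemma bfs_char (place : List (List String)) (p : Int × Int)
    (hp : inbB place p.1 p.2 = true) :
    (bfsFrom place p = true ↔ ConfP place p) := by
  have hWF0 := mkVis_WF place
  have hp' := (inbB_iff _ _ _).mp hp
  set v0 := visSet (mkVis place) p.1 p.2 with hv0
  have hJ0 : Jinv place p v0 := by
    refine ⟨visSet_WF _ _ _ _ hWF0, visGet_visSet_self _ _ _ _ hWF0 hp, ?_⟩
    intro x y hx hy hvis
    rcases visGet_visSet_bound _ _ _ _ _ hvis with h | h
    · rw [visGet_mkVis] at h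
      exact absurd h Bool.false_ne_true
    · left
      have : x = p.1 ∧ y = p.2 := by omega
      rw [this.1, this.2]
  have hv0get : ∀ x y : Int, 0 ≤ x → 0 ≤ y → (x, y) ≠ p → visGet v0 x y = false := by
    intro x y hx hy hne
    rw [hv0, visGet_visSet_ne _ _ _ _ _ (by omega) (by omega) hx hy
      (by rintro hc; exact hne hc), visGet_mkVis]
  have hddne : ∀ dd : Int × Int, dd ∈ dsA → ∀ a b : Int, (a + dd.1, b + dd.2) ≠ (a, b) := by
    intro dd hm a b hc
    have e1 : a + dd.1 = a := congrArg Prod.fst hc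
    have e2 : b + dd.2 = b := congrArg Prod.snd hc
    have : dd.1 = 0 ∧ dd.2 = 0 := by omega
    rcases List.mem_cons.mp hm with h | h
    · rw [h] at this; simp at this
    rcases List.mem_cons.mp h with h | h
    · rw [h] at this; simp at this
    rcases List.mem_cons.mp h with h | h
    · rw [h] at this; simp at this
    rcases List.mem_cons.mp h with h | h
    · rw [h] at this; simp at this
    · simp at h
  show runWhile place 4 [(p.1, p.2, 0)] v0 = true ↔ ConfP place p
  have hspec := runDs_spec place p.1 p.2 0 dsA [] v0 (by norm_num) (by decide)
  set news0 := newsF place v0 p.1 p.2 0 dsA with hnews0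
  have hC2 : (∃ e ∈ news0, ConfAt place p e.1 e.2.1) ↔
      (∃ dd ∈ dsA, inbB place (p.1 + dd.1) (p.2 + dd.2) = true ∧
        cellA place (p.1 + dd.1) (p.2 + dd.2) = "O" ∧
        ConfAt place p (p.1 + dd.1) (p.2 + dd.2)) := by
    constructor
    · rintro ⟨e, hm, hc⟩
      rw [hnews0, mem_newsF] at hm
      obtain ⟨dd, hmd, h1, h2, h3, he⟩ := hm
      refine ⟨dd, hmd, h1, h3, ?_⟩
      rw [he] at hc
      exact hc
    · rintro ⟨dd, hmd, h1, h2, h3⟩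
      refine ⟨(p.1 + dd.1, p.2 + dd.2, 0 + 1), ?_, h3⟩
      rw [hnews0, mem_newsF]
      have h1' := (inbB_iff _ _ _).mp h1
      exact ⟨dd, hmd, h1, hv0get _ _ (by omega) (by omega) (hddne dd hmd p.1 p.2), h2, rfl⟩
  have hw : ∀ (fuel : Nat) (q : List (Int × Int × Int)) (v : List (List Bool)),
      runWhile place (fuel + 1) q v =
        if q.isEmpty = true then false
        else (match runInner place q.length q v with
          | none => true
          | some (q', v') => runWhile place fuel q' v') := fun _ _ _ => rfl
  rw [show (4 : Nat) = 3 + 1 from rfl, hw]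
  simp only [List.isEmpty_cons, Bool.false_eq_true, if_false, List.length_cons, List.length_nil,
    runInner]
  by_cases hhit : ∃ dd ∈ dsA, hitP place v0 p.1 p.2 dd
  · rw [hspec.1.mpr hhit]
    simp only [true_iff]
    exact Or.inl ((hit_iff_confAt place p v0 hJ0 p.1 p.2).mp hhit)
  · have hnc1 : ¬ ConfAt place p p.1 p.2 := by
      rw [← hit_iff_confAt place p v0 hJ0 p.1 p.2]
      exact hhit
    rw [hspec.2 hhit]
    simp only [List.nil_append]
    have hJ1 : Jinv place p (markAll v0 news0) := Jinv_markAll place p v0 hJ0 p.1 p.2 0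
    have hnews1 : ∀ e ∈ news0, e.2.2 = 1 := by
      intro e he
      rw [hnews0, mem_newsF] at he
      obtain ⟨dd, -, -, -, -, he⟩ := he
      rw [he]
      norm_num
    cases hn0 : news0 with
    | nil =>
      rw [show (3 : Nat) = 2 + 1 from rfl, hw]
      simp only [List.isEmpty_nil, if_true]
      constructor
      · intro h; exact absurd h Bool.false_ne_true
      · rintro (h | h)
        · exact absurd h hnc1
        · exact absurd (hC2.mpr h) (by rintro ⟨e, he, -⟩; rw [hn0] at he; cases he)
    | cons e0 rest0 =>
      rw [← hn0]
      have hne0 : news0.isEmpty = false := by rw [hn0]; rfl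
      rw [show (3 : Nat) = 2 + 1 from rfl, hw]
      simp only [hne0, Bool.false_eq_true, if_false]
      have hgen := runInner_gen place p news0 [] (markAll v0 news0) hJ1 hnews1
        (by intro e he; cases he)
      rw [List.append_nil] at hgen
      rcases hri : runInner place news0.length news0 (markAll v0 news0) with _ | ⟨q2, v2⟩
      · show true = true ↔ ConfP place p
        simp only [true_iff]
        right
        exact hC2.mp (hgen.1.mp hri)
      · show runWhile place 2 q2 v2 = true ↔ ConfP place p
        obtain ⟨hq2, hJ2⟩ := hgen.2 q2 v2 hri
        have hnc2 : ¬ ∃ e ∈ news0, ConfAt place p e.1 e.2.1 := by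
          intro h
          rw [← hgen.1] at h
          rw [hri] at h
          cases h
        have hfin : runWhile place 2 q2 v2 = false := by
          cases hq2e : q2 with
          | nil =>
            rw [show (2 : Nat) = 1 + 1 from rfl, hw]
            simp
          | cons a b =>
            rw [← hq2e]
            have hq2ne : q2.isEmpty = false := by rw [hq2e]; rfl
            rw [show (2 : Nat) = 1 + 1 from rfl, hw]
            simp only [hq2ne, Bool.false_eq_true, if_false]
            rw [runInner_d2 place q2.length q2 v2 hq2, List.drop_length]
            show runWhile place (0 + 1) [] v2 = false
            rw [hw]
            simp
        rw [hfin]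
        simp only [Bool.false_eq_true, false_iff]
        rintro (h | h)
        · exact hnc1 h
        · exact hnc2 (hC2.mpr h)


lemma foldl_append_ite {α β : Type} (p : α → Prop) [DecidablePred p] (f : α → β)
    (l : List α) (acc : List β) :
    l.foldl (fun acc x => if p x then acc ++ [f x] else acc) acc =
      acc ++ l.filterMap (fun x => if p x then some (f x) else none) := by
  induction l generalizing acc with
  | nil => simp
  | cons a l ih =>
    by_cases h : p a
    · simp [h, ih]
    · simp [h, ih]

lemma findApplicant_eq_canon (place : List (List String)) :
    findApplicant place = (List.range place.length).flatMap (fun (i : Nat) =>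
      (List.range (place.headD []).length).filterMap (fun (j : Nat) =>
        if cellA place (i : Int) (j : Int) = "P" then some ((i : Int), (j : Int)) else none)) := by
  unfold findApplicant
  have hfun : (fun (acc : List (Int × Int)) (i : Nat) =>
      (List.range (place.headD []).length).foldl (fun acc2 (j : Nat) =>
        if cellA place (i : Int) (j : Int) = "P" then acc2 ++ [((i : Int), (j : Int))] else acc2) acc) =
      (fun (acc : List (Int × Int)) (i : Nat) =>
        acc ++ (List.range (place.headD []).length).filterMap (fun (j : Nat) =>
          if cellA place (i : Int) (j : Int) = "P" then some ((i : Int), (j : Int)) else none)) := by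
    funext acc i
    exact foldl_append_ite (fun j : Nat => cellA place (i : Int) (j : Int) = "P")
      (fun j : Nat => ((i : Int), (j : Int))) (List.range (place.headD []).length) acc
  rw [hfun, PySem.List.foldl_append_eq_flatMap]
  rfl

lemma apps_eq (place : List (List String)) : findApplicant place = appsB place := by
  rw [findApplicant_eq_canon]
  cases place with
  | nil => rfl
  | cons r0 rs =>
    unfold appsB
    simp only [List.isEmpty_cons, Bool.false_eq_true, if_false]
    rw [PySem.List.enumerate_eq_map_pyRange (r0 :: rs) [], List.flatMap_map]
    have hlen : PySem.List.len (r0 :: rs) = ((r0 :: rs).length : Int) := by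
      simp [PySem.List.len]
    rw [hlen, PySem.List.pyRange_one, List.flatMap_map]
    simp only [sub_zero, Int.toNat_natCast, zero_add]
    refine congrArg (fun g => List.flatMap g (List.range (r0 :: rs).length)) ?_
    funext i
    apply List.filterMap_congr
    intro j hj
    have hrow : PySem.List.pyGetD (r0 :: rs) (i : Int) [] = (r0 :: rs).getD i [] := by
      simp [PySem.List.pyGetD_natCast]
    rw [hrow]
    have hcell : cellA (r0 :: rs) (i : Int) (j : Int) = ((r0 :: rs).getD i []).getD j "" := by
      unfold cellA
      simp
    rw [hcell]

lemma mem_apps (place : List (List String)) (z : Int × Int) :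
    z ∈ findApplicant place ↔ inbB place z.1 z.2 = true ∧ cellA place z.1 z.2 = "P" := by
  rw [findApplicant_eq_canon]
  simp only [List.mem_flatMap, List.mem_filterMap, List.mem_range,
    Option.ite_none_right_eq_some, Option.some.injEq]
  constructor
  · rintro ⟨i, hi, j, hj, hP, hz⟩
    rw [← hz]
    refine ⟨(inbB_iff _ _ _).mpr ⟨by omega, by omega, by omega, by omega⟩, hP⟩
  · rintro ⟨hib, hP⟩
    rw [inbB_iff] at hib
    refine ⟨z.1.toNat, by omega, z.2.toNat, by omega, ?_, ?_⟩
    · rw [Int.toNat_of_nonneg (by omega), Int.toNat_of_nonneg (by omega)]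
      exact hP
    · rw [Int.toNat_of_nonneg (by omega), Int.toNat_of_nonneg (by omega)]

-- ---- B-side bridge ----

lemma mem_dsA_of (u v : Int)
    (h : (u = -1 ∧ v = 0) ∨ (u = 1 ∧ v = 0) ∨ (u = 0 ∧ v = -1) ∨ (u = 0 ∧ v = 1)) :
    (u, v) ∈ dsA := by
  rcases h with ⟨h1, h2⟩ | ⟨h1, h2⟩ | ⟨h1, h2⟩ | ⟨h1, h2⟩ <;> subst h1 <;> subst h2 <;> simp [dsA]

lemma dsA_cases (d1 d2 : Int) (h : (d1, d2) ∈ dsA) :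
    (d1 = -1 ∧ d2 = 0) ∨ (d1 = 1 ∧ d2 = 0) ∨ (d1 = 0 ∧ d2 = -1) ∨ (d1 = 0 ∧ d2 = 1) := by
  simp only [dsA, List.mem_cons, List.not_mem_nil, or_false, Prod.mk.injEq] at h
  tauto

lemma cellB_eq (place : List (List String)) (x y : Int) : cellB place x y = cellA place x y := rfl

lemma badPair_eq_true_iff (place : List (List String)) (x1 y1 x2 y2 : Int) :
    badPair place x1 y1 x2 y2 = true ↔
      (|x1 - x2| + |y1 - y2| = 1) ∨
      (|x1 - x2| + |y1 - y2| = 2 ∧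
        ((x1 = x2 ∧ cellA place x1 (PySem.Int.floordiv (y1 + y2) 2) = "O") ∨
         (x1 ≠ x2 ∧ y1 = y2 ∧ cellA place (PySem.Int.floordiv (x1 + x2) 2) y1 = "O") ∨
         (x1 ≠ x2 ∧ y1 ≠ y2 ∧ (cellA place x1 y2 = "O" ∨ cellA place x2 y1 = "O")))) := by
  unfold badPair
  by_cases h1 : |x1 - x2| + |y1 - y2| = 1
  · simp [h1]
  · rw [if_neg h1]
    by_cases h2 : |x1 - x2| + |y1 - y2| = 2
    · rw [if_pos h2]
      by_cases h3 : x1 = x2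
      · rw [if_pos h3]
        have h0 : |x1 - x2| = 0 := by rw [h3, sub_self, abs_zero]
        have hy2 : |y1 - y2| = 2 := by linarith
        have hy1 : |y1 - y2| ≠ 1 := by intro hc; exact h1 (by linarith)
        simp [h3, cellB_eq, hy2]
      · rw [if_neg h3]
        by_cases h4 : y1 = y2
        · rw [if_pos h4]
          have h0 : |y1 - y2| = 0 := by rw [h4, sub_self, abs_zero]
          have hx2 : |x1 - x2| = 2 := by linarith
          simp [h3, h4, cellB_eq, hx2]
        · rw [if_neg h4]
          simp [h2, h3, h4, cellB_eq]
    · rw [if_neg h2]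
      simp [h1, h2]


lemma badPair_symm (place : List (List String)) (x1 y1 x2 y2 : Int) :
    badPair place x1 y1 x2 y2 = badPair place x2 y2 x1 y1 := by
  rw [Bool.eq_iff_iff, badPair_eq_true_iff, badPair_eq_true_iff,
    abs_sub_comm x2 x1, abs_sub_comm y2 y1, add_comm y2 y1, add_comm x2 x1]
  constructor
  · rintro (h | ⟨hd, (⟨he, hc⟩ | ⟨hne, he, hc⟩ | ⟨hnx, hny, hc⟩)⟩)
    · exact Or.inl h
    · exact Or.inr ⟨hd, Or.inl ⟨he.symm, he ▸ hc⟩⟩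
    · exact Or.inr ⟨hd, Or.inr (Or.inl ⟨fun hc' => hne hc'.symm, he.symm, he ▸ hc⟩)⟩
    · exact Or.inr ⟨hd, Or.inr (Or.inr ⟨fun hc' => hnx hc'.symm, fun hc' => hny hc'.symm, hc.symm⟩)⟩
  · rintro (h | ⟨hd, (⟨he, hc⟩ | ⟨hne, he, hc⟩ | ⟨hnx, hny, hc⟩)⟩)
    · exact Or.inl h
    · exact Or.inr ⟨hd, Or.inl ⟨he.symm, he ▸ hc⟩⟩
    · exact Or.inr ⟨hd, Or.inr (Or.inl ⟨fun hc' => hne hc'.symm, he.symm, he ▸ hc⟩)⟩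
    · exact Or.inr ⟨hd, Or.inr (Or.inr ⟨fun hc' => hnx hc'.symm, fun hc' => hny hc'.symm, hc.symm⟩)⟩

lemma confAt_of (place : List (List String)) (p : Int × Int) (x y a b : Int)
    (hdd : (a - x, b - y) ∈ dsA) (hib : inbB place a b = true)
    (hP : cellA place a b = "P") (hne : (a, b) ≠ p) : ConfAt place p x y := by
  refine ⟨(a - x, b - y), hdd, ?_, ?_, ?_⟩ <;>
    rw [show x + ((a - x, b - y) : Int × Int).1 = a by dsimp only; ring,
        show y + ((a - x, b - y) : Int × Int).2 = b by dsimp only; ring]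
  · exact hib
  · exact hP
  · exact hne

lemma badPair_confP (place : List (List String)) (p q : Int × Int)
    (hp : inbB place p.1 p.2 = true ∧ cellA place p.1 p.2 = "P")
    (hq : inbB place q.1 q.2 = true ∧ cellA place q.1 q.2 = "P")
    (hb : badPair place p.1 p.2 q.1 q.2 = true) : ConfP place p := by
  obtain ⟨x1, y1⟩ := p
  obtain ⟨x2, y2⟩ := q
  obtain ⟨hpiB, hpP⟩ := hp
  obtain ⟨hqiB, hqP⟩ := hq
  dsimp only at hpiB hpP hqiB hqP hb ⊢
  have hpi := (inbB_iff _ _ _).mp hpiB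
  have hqi := (inbB_iff _ _ _).mp hqiB
  rw [badPair_eq_true_iff] at hb
  rcases hb with hd1 | ⟨hd2, hcase⟩
  · -- Manhattan distance 1
    have h4 : (x2 = x1 - 1 ∧ y2 = y1) ∨ (x2 = x1 + 1 ∧ y2 = y1) ∨
        (x2 = x1 ∧ y2 = y1 - 1) ∨ (x2 = x1 ∧ y2 = y1 + 1) := by
      rcases abs_cases (x1 - x2) with ⟨ha1, ha2⟩ | ⟨ha1, ha2⟩ <;>
        rcases abs_cases (y1 - y2) with ⟨hb1, hb2⟩ | ⟨hb1, hb2⟩ <;> omega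
    exact Or.inl (confAt_of place (x1, y1) x1 y1 x2 y2 (mem_dsA_of _ _ (by omega))
      hqiB hqP (by simp [Prod.ext_iff]; try omega))
  · rcases hcase with ⟨hex, hmid⟩ | ⟨hnex, hey, hmid⟩ | ⟨hnex, hney, hcor⟩
    · -- same column, straight line
      have h0 : |x1 - x2| = 0 := by rw [hex, sub_self, abs_zero]
      have hy : y2 = y1 + 2 ∨ y2 = y1 - 2 := by
        rcases abs_cases (y1 - y2) with ⟨hb1, hb2⟩ | ⟨hb1, hb2⟩ <;> omega
      subst hex
      rcases hy with hy | hy <;> subst hy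
      · have hf : PySem.Int.floordiv (y1 + (y1 + 2)) 2 = y1 + 1 := by
          rw [PySem.Int.floordiv_eq_ediv_of_pos (by norm_num)]; omega
        rw [hf] at hmid
        refine Or.inr ⟨(0, 1), by simp [dsA], ?_, ?_, ?_⟩
        · exact (inbB_iff _ _ _).mpr ⟨by omega, by omega, by omega, by omega⟩
        · rw [show x1 + (0 : Int) = x1 by ring]
          exact hmid
        · exact confAt_of place (x1, y1) (x1 + 0) (y1 + 1) x1 (y1 + 2)
            (mem_dsA_of _ _ (by omega)) hqiB hqP (by simp [Prod.ext_iff]; try omega)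
      · have hf : PySem.Int.floordiv (y1 + (y1 - 2)) 2 = y1 - 1 := by
          rw [PySem.Int.floordiv_eq_ediv_of_pos (by norm_num)]; omega
        rw [hf] at hmid
        refine Or.inr ⟨(0, -1), by simp [dsA], ?_, ?_, ?_⟩
        · exact (inbB_iff _ _ _).mpr ⟨by omega, by omega, by omega, by omega⟩
        · rw [show x1 + (0 : Int) = x1 by ring, show y1 + (-1 : Int) = y1 - 1 by ring]
          exact hmid
        · exact confAt_of place (x1, y1) (x1 + 0) (y1 + -1) x1 (y1 - 2)
            (mem_dsA_of _ _ (by omega)) hqiB hqP (by simp [Prod.ext_iff]; try omega)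
    · -- same row, straight line
      have h0 : |y1 - y2| = 0 := by rw [hey, sub_self, abs_zero]
      have hx : x2 = x1 + 2 ∨ x2 = x1 - 2 := by
        rcases abs_cases (x1 - x2) with ⟨hb1, hb2⟩ | ⟨hb1, hb2⟩ <;> omega
      subst hey
      rcases hx with hx | hx <;> subst hx
      · have hf : PySem.Int.floordiv (x1 + (x1 + 2)) 2 = x1 + 1 := by
          rw [PySem.Int.floordiv_eq_ediv_of_pos (by norm_num)]; omega
        rw [hf] at hmid
        refine Or.inr ⟨(1, 0), by simp [dsA], ?_, ?_, ?_⟩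
        · exact (inbB_iff _ _ _).mpr ⟨by omega, by omega, by omega, by omega⟩
        · rw [show y1 + (0 : Int) = y1 by ring]
          exact hmid
        · exact confAt_of place (x1, y1) (x1 + 1) (y1 + 0) (x1 + 2) y1
            (mem_dsA_of _ _ (by omega)) hqiB hqP (by simp [Prod.ext_iff]; try omega)
      · have hf : PySem.Int.floordiv (x1 + (x1 - 2)) 2 = x1 - 1 := by
          rw [PySem.Int.floordiv_eq_ediv_of_pos (by norm_num)]; omega
        rw [hf] at hmid
        refine Or.inr ⟨(-1, 0), by simp [dsA], ?_, ?_, ?_⟩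
        · exact (inbB_iff _ _ _).mpr ⟨by omega, by omega, by omega, by omega⟩
        · rw [show x1 + (-1 : Int) = x1 - 1 by ring, show y1 + (0 : Int) = y1 by ring]
          exact hmid
        · exact confAt_of place (x1, y1) (x1 + -1) (y1 + 0) (x1 - 2) y1
            (mem_dsA_of _ _ (by omega)) hqiB hqP (by simp [Prod.ext_iff]; try omega)
    · -- diagonal
      have hdx : (x2 = x1 + 1 ∨ x2 = x1 - 1) ∧ (y2 = y1 + 1 ∨ y2 = y1 - 1) := by
        rcases abs_cases (x1 - x2) with ⟨ha1, ha2⟩ | ⟨ha1, ha2⟩ <;>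
          rcases abs_cases (y1 - y2) with ⟨hb1, hb2⟩ | ⟨hb1, hb2⟩ <;> omega
      rcases hcor with hc1 | hc2
      · refine Or.inr ⟨(0, y2 - y1), mem_dsA_of _ _ (by omega), ?_, ?_, ?_⟩
        · exact (inbB_iff _ _ _).mpr ⟨by omega, by omega, by omega, by omega⟩
        · rw [show x1 + (0 : Int) = x1 by ring, show y1 + (y2 - y1) = y2 by ring]
          exact hc1
        · exact confAt_of place (x1, y1) (x1 + 0) (y1 + (y2 - y1)) x2 y2
            (mem_dsA_of _ _ (by omega)) hqiB hqP (by simp [Prod.ext_iff]; try omega)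
      · refine Or.inr ⟨(x2 - x1, 0), mem_dsA_of _ _ (by omega), ?_, ?_, ?_⟩
        · exact (inbB_iff _ _ _).mpr ⟨by omega, by omega, by omega, by omega⟩
        · rw [show x1 + (x2 - x1) = x2 by ring, show y1 + (0 : Int) = y1 by ring]
          exact hc2
        · exact confAt_of place (x1, y1) (x1 + (x2 - x1)) (y1 + 0) x2 y2
            (mem_dsA_of _ _ (by omega)) hqiB hqP (by simp [Prod.ext_iff]; try omega)

lemma confP_badPair (place : List (List String)) (p : Int × Int)
    (hc : ConfP place p) :
    ∃ q : Int × Int, inbB place q.1 q.2 = true ∧ cellA place q.1 q.2 = "P" ∧ q ≠ p ∧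
      badPair place p.1 p.2 q.1 q.2 = true := by
  obtain ⟨x1, y1⟩ := p
  rcases hc with ⟨⟨d1, d2⟩, hm, hib, hP, hne⟩ |
    ⟨⟨d1, d2⟩, hm, hibO, hO, ⟨e1, e2⟩, hm', hib', hP', hne'⟩
  · dsimp only at hib hP hne
    rcases dsA_cases d1 d2 hm with ⟨h1, h2⟩ | ⟨h1, h2⟩ | ⟨h1, h2⟩ | ⟨h1, h2⟩ <;>
      subst h1 <;> subst h2
    · refine ⟨(x1 + -1, y1 + 0), hib, hP, hne, ?_⟩
      rw [badPair_eq_true_iff]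
      left
      rw [show x1 - (x1 + -1) = 1 by ring, show y1 - (y1 + 0) = 0 by ring]
      decide
    · refine ⟨(x1 + 1, y1 + 0), hib, hP, hne, ?_⟩
      rw [badPair_eq_true_iff]
      left
      rw [show x1 - (x1 + 1) = -1 by ring, show y1 - (y1 + 0) = 0 by ring]
      decide
    · refine ⟨(x1 + 0, y1 + -1), hib, hP, hne, ?_⟩
      rw [badPair_eq_true_iff]
      left
      rw [show x1 - (x1 + 0) = 0 by ring, show y1 - (y1 + -1) = 1 by ring]
      decide
    · refine ⟨(x1 + 0, y1 + 1), hib, hP, hne, ?_⟩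
      rw [badPair_eq_true_iff]
      left
      rw [show x1 - (x1 + 0) = 0 by ring, show y1 - (y1 + 1) = -1 by ring]
      decide
  · dsimp only at hibO hO hib' hP' hne'
    rcases dsA_cases d1 d2 hm with ⟨h1, h2⟩ | ⟨h1, h2⟩ | ⟨h1, h2⟩ | ⟨h1, h2⟩ <;>
      subst h1 <;> subst h2 <;>
      rcases dsA_cases e1 e2 hm' with ⟨g1, g2⟩ | ⟨g1, g2⟩ | ⟨g1, g2⟩ | ⟨g1, g2⟩ <;>
      subst g1 <;> subst g2
    · refine ⟨(x1 + -1 + -1, y1 + 0 + 0), hib', hP', hne', ?_⟩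
      rw [badPair_eq_true_iff]
      right
      constructor
      · rw [show x1 - (x1 + -1 + -1) = 2 by ring, show y1 - (y1 + 0 + 0) = 0 by ring]
        decide
      · refine Or.inr (Or.inl ⟨by omega, by ring, ?_⟩)
        have hf : PySem.Int.floordiv (x1 + (x1 + -1 + -1)) 2 = x1 + -1 := by
          rw [PySem.Int.floordiv_eq_ediv_of_pos (by norm_num)]; omega
        rw [hf]
        rw [show y1 + (0 : Int) = y1 by ring] at hO
        exact hO
    · exact absurd (by simp [Prod.ext_iff]; try omega) hne'
    · refine ⟨(x1 + -1 + 0, y1 + 0 + -1), hib', hP', hne', ?_⟩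
      rw [badPair_eq_true_iff]
      right
      constructor
      · rw [show x1 - (x1 + -1 + 0) = 1 by ring, show y1 - (y1 + 0 + -1) = 1 by ring]
        decide
      · refine Or.inr (Or.inr ⟨by omega, by omega, Or.inr ?_⟩)
        rw [show y1 + (0 : Int) = y1 by ring] at hO
        rw [show x1 + -1 + 0 = x1 + -1 by ring]
        exact hO
    · refine ⟨(x1 + -1 + 0, y1 + 0 + 1), hib', hP', hne', ?_⟩
      rw [badPair_eq_true_iff]
      right
      constructor
      · rw [show x1 - (x1 + -1 + 0) = 1 by ring, show y1 - (y1 + 0 + 1) = -1 by ring]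
        decide
      · refine Or.inr (Or.inr ⟨by omega, by omega, Or.inr ?_⟩)
        rw [show y1 + (0 : Int) = y1 by ring] at hO
        rw [show x1 + -1 + 0 = x1 + -1 by ring]
        exact hO
    · exact absurd (by simp [Prod.ext_iff]; try omega) hne'
    · refine ⟨(x1 + 1 + 1, y1 + 0 + 0), hib', hP', hne', ?_⟩
      rw [badPair_eq_true_iff]
      right
      constructor
      · rw [show x1 - (x1 + 1 + 1) = -2 by ring, show y1 - (y1 + 0 + 0) = 0 by ring]
        decide
      · refine Or.inr (Or.inl ⟨by omega, by ring, ?_⟩)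
        have hf : PySem.Int.floordiv (x1 + (x1 + 1 + 1)) 2 = x1 + 1 := by
          rw [PySem.Int.floordiv_eq_ediv_of_pos (by norm_num)]; omega
        rw [hf]
        rw [show y1 + (0 : Int) = y1 by ring] at hO
        exact hO
    · refine ⟨(x1 + 1 + 0, y1 + 0 + -1), hib', hP', hne', ?_⟩
      rw [badPair_eq_true_iff]
      right
      constructor
      · rw [show x1 - (x1 + 1 + 0) = -1 by ring, show y1 - (y1 + 0 + -1) = 1 by ring]
        decide
      · refine Or.inr (Or.inr ⟨by omega, by omega, Or.inr ?_⟩)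
        rw [show y1 + (0 : Int) = y1 by ring] at hO
        rw [show x1 + 1 + 0 = x1 + 1 by ring]
        exact hO
    · refine ⟨(x1 + 1 + 0, y1 + 0 + 1), hib', hP', hne', ?_⟩
      rw [badPair_eq_true_iff]
      right
      constructor
      · rw [show x1 - (x1 + 1 + 0) = -1 by ring, show y1 - (y1 + 0 + 1) = -1 by ring]
        decide
      · refine Or.inr (Or.inr ⟨by omega, by omega, Or.inr ?_⟩)
        rw [show y1 + (0 : Int) = y1 by ring] at hO
        rw [show x1 + 1 + 0 = x1 + 1 by ring]
        exact hO
    · refine ⟨(x1 + 0 + -1, y1 + -1 + 0), hib', hP', hne', ?_⟩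
      rw [badPair_eq_true_iff]
      right
      constructor
      · rw [show x1 - (x1 + 0 + -1) = 1 by ring, show y1 - (y1 + -1 + 0) = 1 by ring]
        decide
      · refine Or.inr (Or.inr ⟨by omega, by omega, Or.inl ?_⟩)
        rw [show x1 + (0 : Int) = x1 by ring] at hO
        rw [show y1 + -1 + 0 = y1 + -1 by ring]
        exact hO
    · refine ⟨(x1 + 0 + 1, y1 + -1 + 0), hib', hP', hne', ?_⟩
      rw [badPair_eq_true_iff]
      right
      constructor
      · rw [show x1 - (x1 + 0 + 1) = -1 by ring, show y1 - (y1 + -1 + 0) = 1 by ring]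
        decide
      · refine Or.inr (Or.inr ⟨by omega, by omega, Or.inl ?_⟩)
        rw [show x1 + (0 : Int) = x1 by ring] at hO
        rw [show y1 + -1 + 0 = y1 + -1 by ring]
        exact hO
    · refine ⟨(x1 + 0 + 0, y1 + -1 + -1), hib', hP', hne', ?_⟩
      rw [badPair_eq_true_iff]
      right
      constructor
      · rw [show x1 - (x1 + 0 + 0) = 0 by ring, show y1 - (y1 + -1 + -1) = 2 by ring]
        decide
      · refine Or.inl ⟨by ring, ?_⟩
        have hf : PySem.Int.floordiv (y1 + (y1 + -1 + -1)) 2 = y1 + -1 := by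
          rw [PySem.Int.floordiv_eq_ediv_of_pos (by norm_num)]; omega
        rw [hf]
        rw [show x1 + (0 : Int) = x1 by ring] at hO
        exact hO
    · exact absurd (by simp [Prod.ext_iff]; try omega) hne'
    · refine ⟨(x1 + 0 + -1, y1 + 1 + 0), hib', hP', hne', ?_⟩
      rw [badPair_eq_true_iff]
      right
      constructor
      · rw [show x1 - (x1 + 0 + -1) = 1 by ring, show y1 - (y1 + 1 + 0) = -1 by ring]
        decide
      · refine Or.inr (Or.inr ⟨by omega, by omega, Or.inl ?_⟩)
        rw [show x1 + (0 : Int) = x1 by ring] at hO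
        rw [show y1 + 1 + 0 = y1 + 1 by ring]
        exact hO
    · refine ⟨(x1 + 0 + 1, y1 + 1 + 0), hib', hP', hne', ?_⟩
      rw [badPair_eq_true_iff]
      right
      constructor
      · rw [show x1 - (x1 + 0 + 1) = -1 by ring, show y1 - (y1 + 1 + 0) = -1 by ring]
        decide
      · refine Or.inr (Or.inr ⟨by omega, by omega, Or.inl ?_⟩)
        rw [show x1 + (0 : Int) = x1 by ring] at hO
        rw [show y1 + 1 + 0 = y1 + 1 by ring]
        exact hO
    · exact absurd (by simp [Prod.ext_iff]; try omega) hne'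
    · refine ⟨(x1 + 0 + 0, y1 + 1 + 1), hib', hP', hne', ?_⟩
      rw [badPair_eq_true_iff]
      right
      constructor
      · rw [show x1 - (x1 + 0 + 0) = 0 by ring, show y1 - (y1 + 1 + 1) = -2 by ring]
        decide
      · refine Or.inl ⟨by ring, ?_⟩
        have hf : PySem.Int.floordiv (y1 + (y1 + 1 + 1)) 2 = y1 + 1 := by
          rw [PySem.Int.floordiv_eq_ediv_of_pos (by norm_num)]; omega
        rw [hf]
        rw [show x1 + (0 : Int) = x1 by ring] at hO
        exact hO

lemma pairScan_zero_or_one (place : List (List String)) (l : List (Int × Int)) :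
    pairScan place l = 0 ∨ pairScan place l = 1 := by
  induction l with
  | nil => exact Or.inr rfl
  | cons a rest ih =>
    obtain ⟨x, y⟩ := a
    simp only [pairScan]
    split
    · exact Or.inl rfl
    · exact ih

lemma pairScan_eq_one_iff (place : List (List String)) (l : List (Int × Int)) :
    pairScan place l = 1 ↔ l.Pairwise (fun a b => ¬ badPair place a.1 a.2 b.1 b.2 = true) := by
  induction l with
  | nil => simp [pairScan]
  | cons a rest ih =>
    obtain ⟨x, y⟩ := a
    simp only [pairScan]
    rw [List.pairwise_cons]
    split
    · next hany =>
      constructor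
      · intro h; exact absurd h (by norm_num)
      · rintro ⟨hforall, -⟩
        obtain ⟨q, hq, hbad⟩ := List.any_eq_true.mp hany
        exact absurd hbad (hforall q hq)
    · next hany =>
      rw [ih]
      constructor
      · intro h
        refine ⟨?_, h⟩
        intro q hq hbad
        exact (List.any_eq_true.not.mp hany) ⟨q, hq, hbad⟩
      · rintro ⟨-, h⟩
        exact h

-- ===== VERDICT (by name: the statement is the Claim_ definition above) =====
theorem check_spec : Claim_equal_check := by
  intro place hDom hPre
  unfold Spec_check
  simp only [check, check_alt]
  rw [← apps_eq]
  by_cases hemp : (findApplicant place).isEmpty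
  · rw [if_pos hemp]
    rw [List.isEmpty_iff] at hemp
    rw [hemp]
    rfl
  · rw [if_neg hemp]
    by_cases hany : (findApplicant place).any (fun p => bfsFrom place p) = true
    · rw [if_pos hany]
      rcases pairScan_zero_or_one place (findApplicant place) with h0 | h1
      · rw [h0]
      · exfalso
        rw [pairScan_eq_one_iff] at h1
        obtain ⟨p, hpmem, hbfs⟩ := List.any_eq_true.mp hany
        have hpA := (mem_apps place p).mp hpmem
        have hconf := (bfs_char place p hpA.1).mp hbfs
        obtain ⟨q, hqi, hqP, hqne, hbad⟩ := confP_badPair place p hconf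
        have hqmem := (mem_apps place q).mpr ⟨hqi, hqP⟩
        have hsym : Symmetric (fun a b : Int × Int => ¬ badPair place a.1 a.2 b.1 b.2 = true) := by
          intro a b hab hc
          exact hab (by rw [badPair_symm]; exact hc)
        exact List.Pairwise.forall hsym h1 hpmem hqmem (fun hc => hqne hc.symm) hbad
    · rw [if_neg hany]
      rcases pairScan_zero_or_one place (findApplicant place) with h0 | h1
      · exfalso
        have hnp : ¬ (findApplicant place).Pairwise
            (fun a b => ¬ badPair place a.1 a.2 b.1 b.2 = true) := by
          intro hpw
          rw [← pairScan_eq_one_iff] at hpw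
          omega
        rw [List.pairwise_iff_getElem] at hnp
        push Not at hnp
        obtain ⟨i, j, hi, hj, hij, hbad⟩ := hnp
        have hpmem := List.getElem_mem hi
        have hqmem := List.getElem_mem hj
        have hpA := (mem_apps place _).mp hpmem
        have hqA := (mem_apps place _).mp hqmem
        have hconf := badPair_confP place _ _ hpA hqA hbad
        have hbfs := (bfs_char place _ hpA.1).mpr hconf
        apply hany
        rw [List.any_eq_true]
        exact ⟨_, hpmem, hbfs⟩
      · rw [h1]
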